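-- pv_equiv track=rewrite | github.com/zFlayn/PIA-Teoria-de-Automatas-032 | MaquinaTuring.py | turing_machine
-- ===== SOURCE A (Python) =====
-- def turing_machine(input_string):
--     # Verificar la longitud de la cadena
--     if len(input_string) % 4 != 0:
--         return False
--
--     # Definir la tabla de transiciones
--     transitions = {
--         ('q0', 'a'): ('q1', 'ƀ', 'R'),
--         ('q0', 'b'): ('q1', 'ƀ', 'R'),
--         ('q1', 'a'): ('q2', 'ƀ', 'R'),
--         ('q1', 'b'): ('q2', 'ƀ', 'R'),
--         ('q2', 'a'): ('q3', 'ƀ', 'R'),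
--         ('q2', 'b'): ('q3', 'ƀ', 'R'),
--         ('q3', 'a'): ('q0', 'ƀ', 'R'),
--         ('q3', 'b'): ('q0', 'ƀ', 'R'),
--         ('q0', 'ƀ'): ('qAceptación', 'ƀ', 'S')
--     }
--
--     # Definir variables iniciales
--     tape = list(input_string)
--     tape.append('ƀ')  # Agregar el símbolo en blanco al final de la cinta
--     state = 'q0'
--     head_position = 0
--
--     # Ejecutar la máquina de Turing
--     while state != 'qAceptación':
--         current_symbol = tape[head_position]
--         if (state, current_symbol) not in transitions:
--             return False  # La transición no está definida para el estado actual y el símbolo actual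
--         new_state, new_symbol, direction = transitions[(state, current_symbol)]
--         tape[head_position] = new_symbol
--         if direction == 'R':
--             head_position += 1
--         elif direction == 'L':
--             head_position -= 1
--         state = new_state
--
--     return True
-- ===== SOURCE B (Python) =====
-- def turing_machine(input_string):
--     if len(input_string) % 4 != 0:
--         return False
--     return all(c in 'ab' for c in input_string)
-- ===== Notes on version B (the rewrite author's own statement) =====
-- stated objective: simpler
-- what changed: Replaces the tape/transition-table/head Turing-machine simulation with a direct one-pass recognizer: length divisible by 4 and every character in the machine's two-letter input alphabet.
import Mathlib
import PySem

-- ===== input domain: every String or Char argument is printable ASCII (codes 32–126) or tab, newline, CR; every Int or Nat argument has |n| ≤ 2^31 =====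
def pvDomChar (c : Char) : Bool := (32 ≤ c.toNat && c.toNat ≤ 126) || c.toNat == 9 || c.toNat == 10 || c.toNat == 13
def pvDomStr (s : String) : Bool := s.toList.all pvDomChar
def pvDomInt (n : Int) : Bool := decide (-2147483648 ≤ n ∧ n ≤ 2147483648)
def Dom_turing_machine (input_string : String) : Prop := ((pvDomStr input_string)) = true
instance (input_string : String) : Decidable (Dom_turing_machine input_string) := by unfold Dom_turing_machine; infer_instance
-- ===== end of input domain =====

-- B replaces A's tape/transition-table/head Turing-machine simulation with a direct
-- one-pass recognizer (length divisible by 4, all characters in the two-letter alphabet); equal on Dom.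

-- ===== PORT A =====

-- A's transition table, as an insertion-order dict
def pvTransitions : PySem.Dict (String × Char) (String × Char × String) :=
  PySem.Dict.ofList
  [ (("q0", 'a'), ("q1", 'ƀ', "R")),
    (("q0", 'b'), ("q1", 'ƀ', "R")),
    (("q1", 'a'), ("q2", 'ƀ', "R")),
    (("q1", 'b'), ("q2", 'ƀ', "R")),
    (("q2", 'a'), ("q3", 'ƀ', "R")),
    (("q2", 'b'), ("q3", 'ƀ', "R")),
    (("q3", 'a'), ("q0", 'ƀ', "R")),
    (("q3", 'b'), ("q0", 'ƀ', "R")),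
    (("q0", 'ƀ'), ("qAceptación", 'ƀ', "S")) ]

-- A's while-loop, with a fuel guard making the recursion total (the fuel passed by
-- turing_machine is provably sufficient; the `none` branch of pyGet? is Python's
-- IndexError, unreachable from turing_machine's call)
def pvLoopA (fuel : Nat) (tape : List Char) (state : String) (head : Int) : Bool :=
  if state == "qAceptación" then true
  else match fuel with
  | 0 => false
  | fuel + 1 =>
    match PySem.List.pyGet? tape head with
    | none => false
    | some current_symbol =>
      match pvTransitions.get? (state, current_symbol) with
      | none => false
      | some (new_state, new_symbol, direction) =>
        let tape' := PySem.List.pySetD tape head new_symbol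
        let head' := if direction == "R" then head + 1
                     else if direction == "L" then head - 1 else head
        pvLoopA fuel tape' new_state head'

def turing_machine (input_string : String) : Bool :=
  if PySem.Int.mod (PySem.Str.len input_string) 4 != 0 then false
  else
    let tape := input_string.toList ++ ['ƀ']
    pvLoopA (tape.length + 1) tape "q0" 0

-- ===== PORT B =====
def turing_machine_alt (input_string : String) : Bool :=
  if PySem.Int.mod (PySem.Str.len input_string) 4 != 0 then false
  else input_string.toList.all (fun c => c == 'a' || c == 'b')

-- ===== PRECONDITION & SPEC =====
def Spec_turing_machine (input_string : String) (out : Bool) : Prop := out = turing_machine_alt input_string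
instance (input_string : String) (out : Bool) : Decidable (Spec_turing_machine input_string out) := by unfold Spec_turing_machine; infer_instance

-- ===== CLAIM (what is proved, stated in full; the proofs are below) =====
def Claim_equal_turing_machine : Prop := ∀ (input_string : String), Dom_turing_machine input_string → Spec_turing_machine input_string (turing_machine input_string)

-- ===== LEMMAS AND PROOFS =====

-- A's state after k steps to the right
def pvState (k : Nat) : String :=
  match k with | 0 => "q0" | 1 => "q1" | 2 => "q2" | _ => "q3"

theorem pvState_ne (k : Nat) : (pvState k == "qAceptación") = false := by
  unfold pvState; split <;> rfl

theorem pvLoopA_accept (fuel : Nat) (tape : List Char) (head : Int) :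
    pvLoopA fuel tape "qAceptación" head = true := by
  unfold pvLoopA; simp

theorem pvLoopA_step (f : Nat) (tape : List Char) (state : String) (head : Int)
    (h : (state == "qAceptación") = false)
    (c : Char) (hget : PySem.List.pyGet? tape head = some c)
    (ns : String) (nsym : Char)
    (htr : pvTransitions.get? (state, c) = some (ns, nsym, "R")) :
    pvLoopA (f + 1) tape state head
      = pvLoopA f (PySem.List.pySetD tape head nsym) ns (head + 1) := by
  conv_lhs => rw [pvLoopA]
  simp [h, hget, htr]

theorem pvLoopA_stuck (f : Nat) (tape : List Char) (state : String) (head : Int)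
    (h : (state == "qAceptación") = false)
    (c : Char) (hget : PySem.List.pyGet? tape head = some c)
    (htr : pvTransitions.get? (state, c) = none) :
    pvLoopA (f + 1) tape state head = false := by
  unfold pvLoopA; simp [h, hget, htr]

theorem pvTrans_none (st : String) (c : Char)
    (hca : c ≠ 'a') (hcb : c ≠ 'b') (hcx : c ≠ 'ƀ') :
    pvTransitions.get? (st, c) = none := by
  have hmk : pvTransitions = PySem.Dict.mk
    [ (("q0", 'a'), ("q1", 'ƀ', "R")), (("q0", 'b'), ("q1", 'ƀ', "R")),
      (("q1", 'a'), ("q2", 'ƀ', "R")), (("q1", 'b'), ("q2", 'ƀ', "R")),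
      (("q2", 'a'), ("q3", 'ƀ', "R")), (("q2", 'b'), ("q3", 'ƀ', "R")),
      (("q3", 'a'), ("q0", 'ƀ', "R")), (("q3", 'b'), ("q0", 'ƀ', "R")),
      (("q0", 'ƀ'), ("qAceptación", 'ƀ', "S")) ] := by decide
  rw [hmk]
  simp [PySem.Dict.get?, Ne.symm hca, Ne.symm hcb, Ne.symm hcx]

theorem pvTrans_ab (k : Nat) (c : Char) (hc : c = 'a' ∨ c = 'b') :
    pvTransitions.get? (pvState (k % 4), c)
      = some (pvState ((k + 1) % 4), 'ƀ', "R") := by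
  rw [show (k + 1) % 4 = (k % 4 + 1) % 4 from by omega]
  have h4 : k % 4 = 0 ∨ k % 4 = 1 ∨ k % 4 = 2 ∨ k % 4 = 3 := by omega
  rcases hc with rfl | rfl <;> rcases h4 with h | h | h | h <;> rw [h] <;> decide

-- loop invariant: head at cell i, the first i cells already overwritten with 'ƀ',
-- the unread ASCII suffix `rest` still on the tape, followed by the appended blank
theorem pvLoopA_inv (rest : List Char) (i fuel : Nat)
    (hfuel : rest.length + 1 ≤ fuel) (hrest : ∀ c ∈ rest, pvDomChar c) :
    pvLoopA fuel (List.replicate i 'ƀ' ++ (rest ++ ['ƀ'])) (pvState (i % 4)) (i : Int)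
      = (decide ((i + rest.length) % 4 = 0) && rest.all (fun c => c == 'a' || c == 'b')) := by
  induction rest generalizing i fuel with
  | nil =>
    obtain ⟨f, rfl⟩ : ∃ f, fuel = f + 1 := ⟨fuel - 1, by omega⟩
    have hget : PySem.List.pyGet? (List.replicate i 'ƀ' ++ ([] ++ ['ƀ'])) (i : Int) = some 'ƀ' := by
      rw [PySem.List.pyGet?_natCast]; simp
    have h4 : i % 4 = 0 ∨ i % 4 = 1 ∨ i % 4 = 2 ∨ i % 4 = 3 := by omega
    rcases h4 with h | h | h | h <;> rw [h]
    · have h9 : pvTransitions.get? ("q0", 'ƀ') = some ("qAceptación", 'ƀ', "S") := by decide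
      simp [pvLoopA, pvState, hget, h9, h, pvLoopA_accept]
    · have h9 : pvTransitions.get? ("q1", 'ƀ') = none := by decide
      simp [pvLoopA, pvState, hget, h9]; omega
    · have h9 : pvTransitions.get? ("q2", 'ƀ') = none := by decide
      simp [pvLoopA, pvState, hget, h9]; omega
    · have h9 : pvTransitions.get? ("q3", 'ƀ') = none := by decide
      simp [pvLoopA, pvState, hget, h9]; omega
  | cons c rest ih =>
    obtain ⟨f, rfl⟩ : ∃ f, fuel = f + 1 := ⟨fuel - 1, by omega⟩
    have hc : pvDomChar c := hrest c (by simp)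
    have hget : PySem.List.pyGet? (List.replicate i 'ƀ' ++ (c :: rest ++ ['ƀ'])) (i : Int)
        = some c := by
      rw [PySem.List.pyGet?_natCast]; simp
    have hset : PySem.List.pySetD (List.replicate i 'ƀ' ++ (c :: rest ++ ['ƀ'])) (i : Int) 'ƀ'
        = List.replicate (i + 1) 'ƀ' ++ (rest ++ ['ƀ']) := by
      rw [PySem.List.pySetD_natCast, List.set_append]
      simp [List.replicate_succ']
    have hrest' : ∀ x ∈ rest, pvDomChar x := fun x hx => hrest x (by simp [hx])
    have hf : rest.length + 1 ≤ f := by simp at hfuel; omega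
    have hcast : ((i : Int) + 1) = ((i + 1 : Nat) : Int) := by push_cast; ring
    by_cases hab : c = 'a' ∨ c = 'b'
    · rw [pvLoopA_step f _ _ _ (pvState_ne _) c hget _ 'ƀ' (pvTrans_ab i c hab), hset, hcast,
        ih (i + 1) f hf hrest']
      rcases hab with rfl | rfl <;>
        · simp only [List.all_cons, List.length_cons]
          norm_num
          rw [show i + 1 + rest.length = i + (rest.length + 1) from by omega]
          rfl
    · push_neg at hab
      have hcx : c ≠ 'ƀ' := by
        intro h'; subst h'; simp [pvDomChar] at hc
      rw [pvLoopA_stuck f _ _ _ (pvState_ne _) c hget (pvTrans_none _ c hab.1 hab.2 hcx)]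
      simp [hab.1, hab.2]

-- ===== VERDICT (by name: the statement is the Claim_ definition above) =====
theorem turing_machine_spec : Claim_equal_turing_machine := by
  intro s hdom
  have hdom' : ∀ c ∈ s.toList, pvDomChar c := by
    have := hdom; unfold Dom_turing_machine pvDomStr at this
    simpa [List.all_eq_true] using this
  unfold Spec_turing_machine turing_machine turing_machine_alt
  rw [PySem.Str.len_eq]
  rcases Nat.eq_zero_or_pos (s.toList.length % 4) with h4 | h4
  · have hcond : ((PySem.Int.mod ((s.toList.length : Nat) : Int) 4) != 0) = false := by
      rw [show ((4 : Int)) = ((4 : Nat) : Int) by norm_num, PySem.Int.mod_natCast, h4]; rfl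
    have key := pvLoopA_inv s.toList 0 (s.toList.length + 2) (by omega) hdom'
    simp only [List.replicate, List.nil_append, Nat.cast_zero, Nat.zero_add] at key
    rw [show pvState (0 % 4) = "q0" from rfl] at key
    simp only [hcond, Bool.false_eq_true, if_false]
    rw [show (s.toList ++ ['ƀ']).length + 1 = s.toList.length + 2 by simp, key]
    have h4s : s.length % 4 = 0 := by simpa using h4
    simp [h4s]
  · have hcond : ((PySem.Int.mod ((s.toList.length : Nat) : Int) 4) != 0) = true := by
      rw [show ((4 : Int)) = ((4 : Nat) : Int) by norm_num, PySem.Int.mod_natCast]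
      have hl : s.toList.length = s.length := by simp
      simp [bne_iff_ne]
      omega
    simp only [hcond, if_true]
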